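-- pv_equiv track=rewrite | github.com/Seanszn/Verifrag | src/pipeline.py | _merged_answer_block_support_level
-- ===== SOURCE A (Python) =====
-- def _merged_answer_block_support_level(
--     verdicts: list[str | None],
--     support_levels: list[str],
-- ) -> str:
--     if any(verdict == "CONTRADICTED" for verdict in verdicts):
--         return "unsupported"
--     if any(level == "unsupported" for level in support_levels):
--         return "unsupported"
--     if any(level == "possibly_supported" for level in support_levels):
--         return "possibly_supported"
--     if any(level == "supported" for level in support_levels):
--         return "supported"
--     return "unsupported"
-- ===== SOURCE B (Python) =====
-- _RANK = {"supported": 1, "possibly_supported": 2, "unsupported": 3}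
-- _LABEL = {3: "unsupported", 2: "possibly_supported", 1: "supported"}
--
-- def _merged_answer_block_support_level(verdicts, support_levels):
--     if any(v == "CONTRADICTED" for v in verdicts):
--         score = 3
--     else:
--         score = 0
--         for level in support_levels:
--             score = max(score, _RANK.get(level, 0))
--     return _LABEL.get(score, "unsupported")
-- ===== Notes on version B (the rewrite author's own statement) =====
-- stated objective: alternative
-- what changed: Replaces the four sequential early-return any-scans with a single pass computing the max of a numeric rank per support level (forced to 3 on any CONTRADICTED verdict), then mapping the score back to a label.
import Mathlib
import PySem

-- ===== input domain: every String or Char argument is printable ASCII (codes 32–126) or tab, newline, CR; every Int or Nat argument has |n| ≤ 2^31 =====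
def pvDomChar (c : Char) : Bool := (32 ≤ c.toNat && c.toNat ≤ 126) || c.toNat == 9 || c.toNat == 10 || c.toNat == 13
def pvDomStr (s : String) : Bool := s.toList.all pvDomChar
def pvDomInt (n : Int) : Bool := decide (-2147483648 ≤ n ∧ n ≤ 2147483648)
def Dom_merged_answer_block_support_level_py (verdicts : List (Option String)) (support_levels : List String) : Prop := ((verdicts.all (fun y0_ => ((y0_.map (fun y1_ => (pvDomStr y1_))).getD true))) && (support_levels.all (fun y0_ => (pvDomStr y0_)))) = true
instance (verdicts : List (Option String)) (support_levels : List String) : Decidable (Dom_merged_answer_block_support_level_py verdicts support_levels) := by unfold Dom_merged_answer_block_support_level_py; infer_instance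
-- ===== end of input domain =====

-- B replaces A's four sequential early-return scans by one max-of-ranks pass plus a score→label table; same cost, alternative structure.

-- ===== PORT A =====
def merged_answer_block_support_level_py (verdicts : List (Option String)) (support_levels : List String) : String :=
  if verdicts.any (fun v => v == some "CONTRADICTED") then "unsupported"
  else if support_levels.any (fun l => l == "unsupported") then "unsupported"
  else if support_levels.any (fun l => l == "possibly_supported") then "possibly_supported"
  else if support_levels.any (fun l => l == "supported") then "supported"
  else "unsupported"

-- ===== PORT B =====
-- _RANK.get(level, 0)
def pvRank (l : String) : Nat :=
  if l == "supported" then 1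
  else if l == "possibly_supported" then 2
  else if l == "unsupported" then 3
  else 0

-- _LABEL.get(score, "unsupported")
def pvLabel (n : Nat) : String :=
  if n == 3 then "unsupported"
  else if n == 2 then "possibly_supported"
  else if n == 1 then "supported"
  else "unsupported"

def merged_answer_block_support_level_py_alt (verdicts : List (Option String)) (support_levels : List String) : String :=
  let score :=
    if verdicts.any (fun v => v == some "CONTRADICTED") then 3
    else support_levels.foldl (fun score level => max score (pvRank level)) 0
  pvLabel score

-- ===== PRECONDITION & SPEC =====
def Spec_merged_answer_block_support_level_py (verdicts : List (Option String)) (support_levels : List String) (out : String) : Prop := out = merged_answer_block_support_level_py_alt verdicts support_levels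
instance (verdicts : List (Option String)) (support_levels : List String) (out : String) : Decidable (Spec_merged_answer_block_support_level_py verdicts support_levels out) := by unfold Spec_merged_answer_block_support_level_py; infer_instance

-- ===== CLAIM (what is proved, stated in full; the proofs are below) =====
def Claim_equal_merged_answer_block_support_level_py : Prop := ∀ (verdicts : List (Option String)) (support_levels : List String), Dom_merged_answer_block_support_level_py verdicts support_levels → Spec_merged_answer_block_support_level_py verdicts support_levels (merged_answer_block_support_level_py verdicts support_levels)

-- ===== LEMMAS AND PROOFS =====

def pvMaxRank (s : List String) : Nat := s.foldl (fun score level => max score (pvRank level)) 0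

lemma pvMaxRank_acc (s : List String) (acc : Nat) :
    s.foldl (fun score level => max score (pvRank level)) acc = max acc (pvMaxRank s) := by
  induction s generalizing acc with
  | nil => simp [pvMaxRank]
  | cons l t ih =>
      simp only [pvMaxRank, List.foldl_cons] at *
      rw [ih, ih (max 0 (pvRank l))]
      omega

lemma pvMaxRank_cons (l : String) (t : List String) :
    pvMaxRank (l :: t) = max (pvRank l) (pvMaxRank t) := by
  simp only [pvMaxRank, List.foldl_cons]
  rw [pvMaxRank_acc]
  simp only [pvMaxRank]
  omega

lemma pvRank_le (l : String) : pvRank l ≤ 3 := by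
  unfold pvRank; split_ifs <;> omega

lemma pvMaxRank_le (s : List String) : pvMaxRank s ≤ 3 := by
  induction s with
  | nil => simp [pvMaxRank]
  | cons l t ih => rw [pvMaxRank_cons]; exact max_le (pvRank_le l) ih

lemma pvRank_eq3_iff (l : String) : pvRank l = 3 ↔ (l == "unsupported") = true := by
  unfold pvRank; split_ifs with h1 h2 h3 <;> simp_all

lemma pvRank_ge2_iff (l : String) : 2 ≤ pvRank l ↔ ((l == "unsupported") || (l == "possibly_supported")) = true := by
  unfold pvRank; split_ifs with h1 h2 h3 <;> simp_all

lemma pvRank_ge1_iff (l : String) : 1 ≤ pvRank l ↔ ((l == "unsupported") || (l == "possibly_supported") || (l == "supported")) = true := by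
  unfold pvRank; split_ifs with h1 h2 h3 <;> simp_all

lemma pvMaxRank_eq3 (s : List String) :
    pvMaxRank s = 3 ↔ s.any (fun l => l == "unsupported") = true := by
  induction s with
  | nil => simp [pvMaxRank]
  | cons l t ih =>
      rw [pvMaxRank_cons]
      have hl := pvRank_eq3_iff l
      have h1 := pvMaxRank_le t
      have h2 := pvRank_le l
      simp only [List.any_cons, Bool.or_eq_true] at *
      constructor
      · intro h
        have : pvRank l = 3 ∨ pvMaxRank t = 3 := by omega
        tauto
      · intro h
        have : pvRank l = 3 ∨ pvMaxRank t = 3 := by tauto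
        omega

lemma pvMaxRank_ge2 (s : List String) :
    2 ≤ pvMaxRank s ↔ (s.any (fun l => l == "unsupported") || s.any (fun l => l == "possibly_supported")) = true := by
  induction s with
  | nil => simp [pvMaxRank]
  | cons l t ih =>
      rw [pvMaxRank_cons]
      have hl := pvRank_ge2_iff l
      simp only [List.any_cons, Bool.or_eq_true] at *
      constructor
      · intro h
        have : 2 ≤ pvRank l ∨ 2 ≤ pvMaxRank t := by omega
        tauto
      · intro h
        have : 2 ≤ pvRank l ∨ 2 ≤ pvMaxRank t := by tauto
        omega

lemma pvMaxRank_ge1 (s : List String) :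
    1 ≤ pvMaxRank s ↔ (s.any (fun l => l == "unsupported") || s.any (fun l => l == "possibly_supported") || s.any (fun l => l == "supported")) = true := by
  induction s with
  | nil => simp [pvMaxRank]
  | cons l t ih =>
      rw [pvMaxRank_cons]
      have hl := pvRank_ge1_iff l
      simp only [List.any_cons, Bool.or_eq_true] at *
      constructor
      · intro h
        have : 1 ≤ pvRank l ∨ 1 ≤ pvMaxRank t := by omega
        tauto
      · intro h
        have : 1 ≤ pvRank l ∨ 1 ≤ pvMaxRank t := by tauto
        omega

-- ===== VERDICT (by name: the statement is the Claim_ definition above) =====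
theorem merged_answer_block_support_level_py_spec : Claim_equal_merged_answer_block_support_level_py := by
  intro verdicts support_levels _
  unfold Spec_merged_answer_block_support_level_py
  unfold merged_answer_block_support_level_py merged_answer_block_support_level_py_alt
  by_cases hc : verdicts.any (fun v => v == some "CONTRADICTED") = true
  · simp [hc, pvLabel]
  · simp only [Bool.not_eq_true] at hc
    rw [hc]
    simp only [Bool.false_eq_true, if_false]
    have hle := pvMaxRank_le support_levels
    by_cases h3 : support_levels.any (fun l => l == "unsupported") = true
    · have := (pvMaxRank_eq3 support_levels).mpr h3
      simp [h3, pvMaxRank] at this ⊢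
      rw [show support_levels.foldl (fun score level => max score (pvRank level)) 0 = 3 from this]
      simp [pvLabel]
    · by_cases h2 : support_levels.any (fun l => l == "possibly_supported") = true
      · have hge : 2 ≤ pvMaxRank support_levels := by
          apply (pvMaxRank_ge2 support_levels).mpr; simp [h2]
        have hne : pvMaxRank support_levels ≠ 3 := by
          intro h; exact h3 ((pvMaxRank_eq3 support_levels).mp h)
        have : pvMaxRank support_levels = 2 := by omega
        simp only [pvMaxRank] at this
        simp [h3, h2, this, pvLabel]
      · by_cases h1 : support_levels.any (fun l => l == "supported") = true
        · have hge : 1 ≤ pvMaxRank support_levels := by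
            apply (pvMaxRank_ge1 support_levels).mpr; simp [h1]
          have hlt : ¬ 2 ≤ pvMaxRank support_levels := by
            intro h
            rcases Bool.or_eq_true_iff.mp ((pvMaxRank_ge2 support_levels).mp h) with h | h
            · exact h3 h
            · exact h2 h
          have : pvMaxRank support_levels = 1 := by omega
          simp only [pvMaxRank] at this
          simp [h3, h2, h1, this, pvLabel]
        · have hlt : ¬ 1 ≤ pvMaxRank support_levels := by
            intro h
            rcases Bool.or_eq_true_iff.mp ((pvMaxRank_ge1 support_levels).mp h) with h | h
            · rcases Bool.or_eq_true_iff.mp h with h | h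
              · exact h3 h
              · exact h2 h
            · exact h1 h
          have : pvMaxRank support_levels = 0 := by omega
          simp only [pvMaxRank] at this
          simp [h3, h2, h1, this, pvLabel]
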